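-- pv_equiv track=rewrite | github.com/pdqnguyen/PEMcoupling | coupling/utils.py | pem_sort
-- ===== SOURCE A (Python) =====
-- def pem_sort(chans):
--     """
--     Sort PEM channels by location.
--
--     Parameters
--     ----------
--     chans : list
--         Channel names to be sorted.
--
--     Returns
--     -------
--     chans_sorted : list
--         Sorted channel names.
--     """
--
--     sort_key = [
--         'PSL',
--         'ISCT1',
--         'IOT',
--         'HAM1',
--         'HAM2',
--         'INPUT',
--         'MCTUBE',
--         'HAM3',
--         'LVEA_BS',
--         'CS_ACC_BSC',
--         'VERTEX',
--         'OPLEV_ITMY',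
--         'YMAN',
--         'YCRYO',
--         'OPLEV_ITMX',
--         'XMAN',
--         'XCRYO',
--         'HAM4',
--         'SRTUBE',
--         'HAM5',
--         'HAM6',
--         'OUTPUTOPTICS',
--         'ISCT6',
--         'CS_ACC_EBAY',
--         'CS_MIC_EBAY',
--         'CS_',
--         'EX_',
--         'EY_'
--     ]
--     chans_sorted = []
--     for key in sort_key:
--         # Add channels that match this key and are not yet added
--         chans_sorted += sorted([c for c in chans if (key in c) and (c not in chans_sorted)])
--     # Add remaining channels at the end
--     chans_sorted += sorted([c for c in chans if (c not in chans_sorted)])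
--     return chans_sorted
-- ===== SOURCE B (Python) =====
-- def pem_sort(chans):
--     sort_key = [
--         'PSL', 'ISCT1', 'IOT', 'HAM1', 'HAM2', 'INPUT', 'MCTUBE', 'HAM3',
--         'LVEA_BS', 'CS_ACC_BSC', 'VERTEX', 'OPLEV_ITMY', 'YMAN', 'YCRYO',
--         'OPLEV_ITMX', 'XMAN', 'XCRYO', 'HAM4', 'SRTUBE', 'HAM5', 'HAM6',
--         'OUTPUTOPTICS', 'ISCT6', 'CS_ACC_EBAY', 'CS_MIC_EBAY', 'CS_', 'EX_', 'EY_'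
--     ]
--
--     def prio(c):
--         for i, key in enumerate(sort_key):
--             if key in c:
--                 return i
--         return len(sort_key)
--
--     return sorted(chans, key=lambda c: (prio(c), c))
-- ===== Notes on version B (the rewrite author's own statement) =====
-- stated objective: idiomatic
-- what changed: Replaces A's 28 per-key passes (each filtering all channels, testing membership in the growing result list, and sorting one bucket) plus a final leftover pass by computing each channel's priority (index of its first matching key) and doing a single stable sort on the composite key (priority, name).
import Mathlib
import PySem

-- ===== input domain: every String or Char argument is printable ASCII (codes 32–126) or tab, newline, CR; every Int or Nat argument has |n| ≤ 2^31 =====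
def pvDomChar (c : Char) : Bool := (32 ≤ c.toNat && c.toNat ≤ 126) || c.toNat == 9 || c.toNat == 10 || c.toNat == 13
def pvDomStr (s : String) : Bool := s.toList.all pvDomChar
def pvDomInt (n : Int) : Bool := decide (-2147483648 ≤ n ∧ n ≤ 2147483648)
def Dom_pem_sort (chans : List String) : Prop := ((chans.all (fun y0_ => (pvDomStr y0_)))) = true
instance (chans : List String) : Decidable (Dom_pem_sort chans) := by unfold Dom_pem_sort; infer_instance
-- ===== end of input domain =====

-- B replaces A's per-key filtered-and-sorted passes over the growing result list by a single
-- composite-key sort: sort once by (index of first matching key, name). Objective: idiomatic.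

-- the location-priority key list (shared literal constant of both ports)
def pvSortKey : List String :=
  ["PSL", "ISCT1", "IOT", "HAM1", "HAM2", "INPUT", "MCTUBE", "HAM3",
   "LVEA_BS", "CS_ACC_BSC", "VERTEX", "OPLEV_ITMY", "YMAN", "YCRYO",
   "OPLEV_ITMX", "XMAN", "XCRYO", "HAM4", "SRTUBE", "HAM5", "HAM6",
   "OUTPUTOPTICS", "ISCT6", "CS_ACC_EBAY", "CS_MIC_EBAY", "CS_", "EX_", "EY_"]

-- ===== PORT A =====
def pem_sort (chans : List String) : List String :=
  let chans_sorted := pvSortKey.foldl (fun acc key =>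
    acc ++ PySem.List.sorted (chans.filter (fun c => PySem.Str.isIn key c && !(acc.contains c))) (fun c => c)) []
  chans_sorted ++ PySem.List.sorted (chans.filter (fun c => !(chans_sorted.contains c))) (fun c => c)

-- ===== PORT B =====
-- prio(c): index of the first key of sort_key contained in c, else len(sort_key)
def pvPrioAux : List String → String → Nat
  | [], _ => 0
  | k :: ks, c => if PySem.Str.isIn k c then 0 else pvPrioAux ks c + 1

def pvPrio (c : String) : Nat := pvPrioAux pvSortKey c

def pem_sort_alt (chans : List String) : List String :=
  PySem.List.sorted2 chans (fun c => pvPrio c) (fun c => c)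

-- ===== PRECONDITION & SPEC =====
def Spec_pem_sort (chans : List String) (out : List String) : Prop := out = pem_sort_alt chans
instance (chans : List String) (out : List String) : Decidable (Spec_pem_sort chans out) := by unfold Spec_pem_sort; infer_instance

-- ===== CLAIM (what is proved, stated in full; the proofs are below) =====
def Claim_equal_pem_sort : Prop := ∀ (chans : List String), Dom_pem_sort chans → Spec_pem_sort chans (pem_sort chans)

-- ===== LEMMAS AND PROOFS =====

-- bucket i: the channels of xs whose first matching key (w.r.t. keys) is at index i, sorted
def pvBkt (keys : List String) (xs : List String) (i : Nat) : List String :=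
  PySem.List.sorted (xs.filter (fun c => pvPrioAux keys c == i)) (fun c => c)

-- the composite comparison sorted2 uses for key (prio, id)
def pvLt2 (a b : String) : Bool :=
  decide (pvPrio a < pvPrio b) || (!decide (pvPrio b < pvPrio a) && decide (a < b))

theorem pvPrioAux_le (keys : List String) (c : String) : pvPrioAux keys c ≤ keys.length := by
  induction keys with
  | nil => simp [pvPrioAux]
  | cons k ks ih => simp only [pvPrioAux, List.length_cons]; split <;> omega

theorem pvPrioAux_append_singleton (keys : List String) (k : String) (c : String) :
    pvPrioAux (keys ++ [k]) c =
      if pvPrioAux keys c < keys.length then pvPrioAux keys c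
      else (if PySem.Str.isIn k c then keys.length else keys.length + 1) := by
  induction keys with
  | nil => simp [pvPrioAux]
  | cons k0 ks ih =>
      simp only [List.cons_append, pvPrioAux, List.length_cons, ih]
      have := pvPrioAux_le ks c
      by_cases h0 : PySem.Str.isIn k0 c = true
      · simp only [if_pos h0]
        rw [if_pos (by omega : 0 < ks.length + 1)]
      · simp only [if_neg h0]
        by_cases hk : PySem.Str.isIn k c = true
        · simp only [if_pos hk]
          split <;> split <;> omega
        · simp only [if_neg hk]
          split <;> split <;> omega

theorem pv_insertBy_all_before (before : String → String → Bool) (x : String) (rest : List String)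
    (h : ∀ z ∈ rest, before x z = true) :
    PySem.List.insertBy before x rest = x :: rest := by
  cases rest with
  | nil => simp [PySem.List.insertBy]
  | cons z zs => simp [PySem.List.insertBy, h z (by simp)]

theorem pv_insertBy_append_left (before : String → String → Bool) (x : String)
    (ys zs : List String) (h : ∀ y ∈ ys, before x y = false) :
    PySem.List.insertBy before x (ys ++ zs) = ys ++ PySem.List.insertBy before x zs := by
  induction ys with
  | nil => simp
  | cons y ys ih =>
      have hy : before x y = false := h y (by simp)
      simp [PySem.List.insertBy, hy, ih (fun z hz => h z (by simp [hz]))]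

theorem pv_insertBy_congr_append (before before' : String → String → Bool) (x : String)
    (ys rest : List String) (h1 : ∀ y ∈ ys, before x y = before' x y)
    (h2 : ∀ z ∈ rest, before x z = true) :
    PySem.List.insertBy before x (ys ++ rest) = PySem.List.insertBy before' x ys ++ rest := by
  induction ys with
  | nil => simpa [PySem.List.insertBy] using pv_insertBy_all_before before x rest h2
  | cons y ys ih =>
      have hy := h1 y (by simp)
      by_cases hb : before' x y = true
      · simp [PySem.List.insertBy, hy, hb]
      · simp only [Bool.not_eq_true] at hb
        simp [PySem.List.insertBy, hy, hb, ih (fun z hz => h1 z (by simp [hz]))]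

theorem pv_sorted_append_singleton (ys : List String) (x : String) {κ : Type} [LinearOrder κ] (key : String → κ) :
    PySem.List.sorted (ys ++ [x]) key false =
      PySem.List.insertBy (fun a b => decide (key a < key b)) x (PySem.List.sorted ys key false) := by
  rw [PySem.List.sorted_eq_foldl_insertBy, PySem.List.sorted_eq_foldl_insertBy, List.foldl_append]
  simp

theorem pv_sorted2_eq_foldl (xs : List String) :
    PySem.List.sorted2 xs (fun c => pvPrio c) (fun c => c) false =
      xs.foldl (fun acc x => PySem.List.insertBy pvLt2 x acc) [] := rfl

-- membership in the bucket concatenation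
theorem pv_mem_cat (keys xs : List String) (m : Nat) (c : String) :
    c ∈ (List.range m).flatMap (pvBkt keys xs) ↔ c ∈ xs ∧ pvPrioAux keys c < m := by
  simp only [List.mem_flatMap, List.mem_range, pvBkt, PySem.List.mem_sorted, List.mem_filter,
    beq_iff_eq]
  constructor
  · rintro ⟨i, hi, hc, rfl⟩; exact ⟨hc, hi⟩
  · rintro ⟨hc, hm⟩; exact ⟨_, hm, hc, rfl⟩

-- A's accumulation loop produces exactly the bucket concatenation
theorem pvA_loop (keys chans : List String) :
    keys.foldl (fun acc key =>
      acc ++ PySem.List.sorted (chans.filter (fun c => PySem.Str.isIn key c && !(acc.contains c))) (fun c => c)) []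
    = (List.range keys.length).flatMap (pvBkt keys chans) := by
  induction keys using List.reverseRecOn with
  | nil => simp
  | append_singleton ks k ih =>
      rw [List.foldl_append]
      simp only [List.foldl_cons, List.foldl_nil, ih]
      have hfit : chans.filter (fun c => PySem.Str.isIn k c && !(((List.range ks.length).flatMap (pvBkt ks chans)).contains c))
          = chans.filter (fun c => pvPrioAux (ks ++ [k]) c == ks.length) := by
        apply List.filter_congr
        intro c hc
        have hmem := pv_mem_cat ks chans ks.length c
        have hle := pvPrioAux_le ks c
        have happ := pvPrioAux_append_singleton ks k c
        rw [Bool.eq_iff_iff]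
        simp only [Bool.and_eq_true, Bool.not_eq_true', beq_iff_eq,
          List.contains_eq_mem, decide_eq_false_iff_not, hmem]
        constructor
        · rintro ⟨hin, hnm⟩
          have : ¬ pvPrioAux ks c < ks.length := fun h => hnm ⟨hc, h⟩
          rw [happ, if_neg this, if_pos hin]
        · intro h
          by_cases hin : PySem.Str.isIn k c = true
          · refine ⟨hin, ?_⟩
            rintro ⟨-, hlt⟩
            rw [happ, if_pos hlt] at h; omega
          · exfalso
            by_cases hlt : pvPrioAux ks c < ks.length
            · rw [happ, if_pos hlt] at h; omega
            · rw [happ, if_neg hlt, if_neg hin] at h; omega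
      have hbkt : ∀ i ∈ List.range ks.length, pvBkt ks chans i = pvBkt (ks ++ [k]) chans i := by
        intro i hi
        rw [List.mem_range] at hi
        unfold pvBkt
        congr 1
        apply List.filter_congr
        intro c _
        have hle := pvPrioAux_le ks c
        have happ := pvPrioAux_append_singleton ks k c
        rw [Bool.eq_iff_iff]
        simp only [beq_iff_eq]
        constructor
        · intro h; rw [happ, if_pos (h ▸ hi), h]
        · intro h
          by_cases hlt : pvPrioAux ks c < ks.length
          · rwa [happ, if_pos hlt] at h
          · rw [happ, if_neg hlt] at h; split at h <;> omega
      calc (List.range ks.length).flatMap (pvBkt ks chans)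
          ++ PySem.List.sorted (chans.filter (fun c => PySem.Str.isIn k c && !(((List.range ks.length).flatMap (pvBkt ks chans)).contains c))) (fun c => c)
        = (List.range ks.length).flatMap (pvBkt (ks ++ [k]) chans) ++ [pvBkt (ks ++ [k]) chans ks.length].flatten := by
            rw [hfit]
            congr 1
            · rw [List.flatMap_def, List.flatMap_def, List.map_congr_left hbkt]
            · simp [pvBkt]
        _ = (List.range (ks ++ [k]).length).flatMap (pvBkt (ks ++ [k]) chans) := by
            simp [List.length_append, List.range_succ, List.flatMap_def]

-- A equals the full bucket concatenation (including the no-key-matched tail bucket)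
theorem pvA_eq (chans : List String) :
    pem_sort chans = (List.range (pvSortKey.length + 1)).flatMap (pvBkt pvSortKey chans) := by
  unfold pem_sort
  simp only [pvA_loop]
  have hfit : chans.filter (fun c => !(((List.range pvSortKey.length).flatMap (pvBkt pvSortKey chans)).contains c))
      = chans.filter (fun c => pvPrioAux pvSortKey c == pvSortKey.length) := by
    apply List.filter_congr
    intro c hc
    have hmem := pv_mem_cat pvSortKey chans pvSortKey.length c
    have hle := pvPrioAux_le pvSortKey c
    rw [Bool.eq_iff_iff]
    simp only [Bool.not_eq_true', beq_iff_eq, List.contains_eq_mem, decide_eq_false_iff_not, hmem]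
    constructor
    · intro h
      have : ¬ pvPrioAux pvSortKey c < pvSortKey.length := fun hl => h ⟨hc, hl⟩
      omega
    · intro h; rintro ⟨-, hl⟩; omega
  rw [hfit, List.range_succ, List.flatMap_append]
  simp [pvBkt]

-- B: inserting one element into the bucket concatenation lands in its own bucket
theorem pvB_eq (chans : List String) :
    pem_sort_alt chans = (List.range (pvSortKey.length + 1)).flatMap (pvBkt pvSortKey chans) := by
  unfold pem_sort_alt
  rw [pv_sorted2_eq_foldl]
  set n := pvSortKey.length with hn
  induction chans using List.reverseRecOn with
  | nil => simp [pvBkt, PySem.List.sorted_eq_nil_iff]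
  | append_singleton xs x ih =>
      rw [List.foldl_append, List.foldl_cons, List.foldl_nil, ih]
      set p := pvPrio x with hp
      have hrp : pvPrioAux pvSortKey x = p := rfl
      have hple : p ≤ n := pvPrioAux_le pvSortKey x
      -- split the range at p
      have hsplit : ∀ ys : List String,
          (List.range (n + 1)).flatMap (pvBkt pvSortKey ys)
          = (List.range p).flatMap (pvBkt pvSortKey ys)
            ++ (pvBkt pvSortKey ys p
              ++ (List.range (n - p)).flatMap (fun j => pvBkt pvSortKey ys (p + (j + 1)))) := by
        intro ys
        have h1 : n + 1 = p + (n - p + 1) := by omega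
        rw [h1, List.range_add, List.flatMap_append, List.flatMap_map,
          List.range_succ_eq_map, List.flatMap_cons, List.flatMap_map]
        simp
      rw [hsplit, hsplit (xs ++ [x])]
      -- x skips the lower buckets
      rw [pv_insertBy_append_left]
      · -- buckets below p are unchanged by appending x
        have hlow : (List.range p).flatMap (pvBkt pvSortKey xs)
            = (List.range p).flatMap (pvBkt pvSortKey (xs ++ [x])) := by
          rw [List.flatMap_def, List.flatMap_def]
          apply congrArg
          apply List.map_congr_left
          intro i hi
          rw [List.mem_range] at hi
          unfold pvBkt
          rw [List.filter_append]
          have hne : (pvPrioAux pvSortKey x == i) = false := by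
            rw [hrp, beq_eq_false_iff_ne]; omega
          simp [hne]
        rw [hlow]
        congr 1
        -- insert x into its own bucket; higher buckets unchanged
        rw [pv_insertBy_congr_append pvLt2 (fun a b => decide (a < b)) x]
        · congr 1
          · -- the p bucket gains x
            unfold pvBkt
            rw [List.filter_append]
            have heq : (pvPrioAux pvSortKey x == p) = true := by
              rw [hrp]; simp
            simp only [List.filter_cons, List.filter_nil, heq, if_true]
            rw [pv_sorted_append_singleton (xs.filter (fun c => pvPrioAux pvSortKey c == p)) x (fun c => c)]
          · -- buckets above p unchanged
            rw [List.flatMap_def, List.flatMap_def]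
            apply congrArg
            apply List.map_congr_left
            intro j _
            unfold pvBkt
            rw [List.filter_append]
            have hne : (pvPrioAux pvSortKey x == (p + (j + 1))) = false := by
              rw [hrp, beq_eq_false_iff_ne]; omega
            simp [hne]
        · -- inside bucket p the composite order is the string order
          intro y hy
          have hpy : pvPrio y = p := by
            simp only [pvBkt, PySem.List.mem_sorted, List.mem_filter, beq_iff_eq] at hy
            exact hy.2
          simp [pvLt2, hpy, ← hp]
        · -- everything after bucket p compares greater
          intro z hz
          have hpz : p < pvPrio z := by
            simp only [List.mem_flatMap, List.mem_range, pvBkt, PySem.List.mem_sorted,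
              List.mem_filter, beq_iff_eq] at hz
            obtain ⟨j, -, -, h⟩ := hz
            change pvPrio z = _ at h
            omega
          simp only [pvLt2, Bool.or_eq_true, decide_eq_true_iff]
          exact Or.inl (hp ▸ hpz)
      · -- everything before bucket p compares smaller (x is not inserted there)
        intro y hy
        have hpy : pvPrio y < p := by
          simp only [List.mem_flatMap, List.mem_range, pvBkt, PySem.List.mem_sorted,
            List.mem_filter, beq_iff_eq] at hy
          obtain ⟨i, hi, -, h⟩ := hy
          change pvPrio y = _ at h
          omega
        have hpx : pvPrio y < pvPrio x := hp ▸ hpy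
        simp only [pvLt2, Bool.or_eq_false_iff, Bool.and_eq_false_iff, decide_eq_false_iff_not,
          Nat.not_lt]
        exact ⟨Nat.le_of_lt hpx, Or.inl (by simp [hpx])⟩

-- ===== VERDICT (by name: the statement is the Claim_ definition above) =====
theorem pem_sort_spec : Claim_equal_pem_sort := by
  intro chans _
  unfold Spec_pem_sort
  rw [pvA_eq, pvB_eq]
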